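-- pv_equiv track=rewrite | github.com/jho951/coding-test | 프로그래머스/1/132267. 콜라 문제/콜라 문제.py | solution
-- ===== SOURCE A (Python) =====
-- def solution(a, b, n):
--
--     total_new_cola = 0
--     current_empty_bottles = n
--
--     while current_empty_bottles >= a:
--
--         new_cola_received = (current_empty_bottles // a) * b
--
--         remaining_empty_bottles = current_empty_bottles % a
--
--         total_new_cola += new_cola_received
--
--         current_empty_bottles = remaining_empty_bottles + new_cola_received
--
--     return total_new_cola
-- ===== SOURCE B (Python) =====
-- def solution(a, b, n):
--     # Closed form: each exchange consumes a-b bottles net and yields b colas,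
--     # and exchanging is possible while at least a bottles remain, giving
--     # floor((n-b)/(a-b)) exchanged units of b colas each; no loop needed.
--     if n < a:
--         return 0
--     return ((n - b) // (a - b)) * b
-- ===== Notes on version B (the rewrite author's own statement) =====
-- stated objective: simpler
-- what changed: Replaces A's exchange-simulation while loop with the closed-form formula ((n-b)//(a-b))*b (0 when n < a).
-- outside the precondition, e.g. on solution(3, -2, 10): A returns -6, B returns -4; on solution(-2, 1, 5): A returns -3, B returns -2
import Mathlib
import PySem

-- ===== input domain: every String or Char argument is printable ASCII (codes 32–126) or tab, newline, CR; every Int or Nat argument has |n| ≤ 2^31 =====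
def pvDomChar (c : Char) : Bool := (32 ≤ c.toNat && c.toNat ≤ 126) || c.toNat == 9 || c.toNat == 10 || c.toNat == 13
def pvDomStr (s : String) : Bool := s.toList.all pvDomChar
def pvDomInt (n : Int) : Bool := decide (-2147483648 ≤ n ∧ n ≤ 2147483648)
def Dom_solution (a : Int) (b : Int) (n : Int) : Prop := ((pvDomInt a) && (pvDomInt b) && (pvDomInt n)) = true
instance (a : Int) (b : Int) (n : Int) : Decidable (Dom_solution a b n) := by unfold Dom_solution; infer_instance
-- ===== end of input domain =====

-- B replaces A's exchange-simulation while loop with the closed-form formula ((n-b)//(a-b))*b.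


-- ===== PORT A =====
-- A's while loop; the '0 < a ∧ b < a' part of the guard is a totality guard only
-- (inside Pre_solution the loop body is reached exactly when Python's 'e >= a' holds).
def solutionLoop (a b e total : Int) : Int :=
  if h : a ≤ e ∧ 0 < a ∧ b < a then
    solutionLoop a b
      (PySem.Int.mod e a + PySem.Int.floordiv e a * b)
      (total + PySem.Int.floordiv e a * b)
  else total
termination_by e.toNat
decreasing_by
  obtain ⟨hae, ha, hba⟩ := h
  have hq : 1 ≤ PySem.Int.floordiv e a := by
    rw [PySem.Int.le_floordiv_iff_mul_le ha]; omega
  have hm1 : 0 ≤ PySem.Int.mod e a := by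
    rw [PySem.Int.mod_eq_emod_of_pos ha]; exact Int.emod_nonneg e (by omega)
  have hm2 : PySem.Int.mod e a < a := by
    rw [PySem.Int.mod_eq_emod_of_pos ha]; exact Int.emod_lt_of_pos e ha
  have heq : PySem.Int.floordiv e a * a + PySem.Int.mod e a = e :=
    PySem.Int.floordiv_mul_add_mod e a
  have hlt : PySem.Int.floordiv e a * b ≤ PySem.Int.floordiv e a * a - PySem.Int.floordiv e a := by
    nlinarith
  omega

def solution (a : Int) (b : Int) (n : Int) : Int := solutionLoop a b n 0

-- ===== PORT B =====
def solution_alt (a : Int) (b : Int) (n : Int) : Int :=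
  if n < a then 0 else PySem.Int.floordiv (n - b) (a - b) * b

-- ===== PRECONDITION & SPEC =====
-- Pre_ excludes inputs outside the problem's natural domain (a ≤ 0, b < 0, or b ≥ a) that still
-- enter the loop: on most of them A's while loop diverges, and where A still returns (negative a
-- or b) the value reflects meaningless negative bottle exchanges.
def Pre_solution (a : Int) (b : Int) (n : Int) : Prop :=
  n < a ∨ (0 < a ∧ 0 ≤ b ∧ b < a)
instance (a : Int) (b : Int) (n : Int) : Decidable (Pre_solution a b n) := by
  unfold Pre_solution; infer_instance
def pvWitness_solution : Int × Int × Int := (2, 1, 20)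
def Spec_solution (a : Int) (b : Int) (n : Int) (out : Int) : Prop := out = solution_alt a b n
instance (a : Int) (b : Int) (n : Int) (out : Int) : Decidable (Spec_solution a b n out) := by unfold Spec_solution; infer_instance

-- ===== CLAIM (what is proved, stated in full; the proofs are below) =====
def Claim_equal_solution : Prop := ∀ (a : Int) (b : Int) (n : Int), Dom_solution a b n → Pre_solution a b n → Spec_solution a b n (solution a b n)

-- ===== LEMMAS AND PROOFS =====

-- Loop invariant: under 0 < a, 0 ≤ b < a, the loop adds exactly B's closed form to its accumulator.
theorem solutionLoop_closed :
    ∀ (a b e total : Int), 0 < a → 0 ≤ b → b < a →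
      solutionLoop a b e total = total + solution_alt a b e := by
  intro a b e total
  induction e, total using solutionLoop.induct a b with
  | case1 e total h ih =>
    intro ha hb0 hba
    have hae : a ≤ e := h.1
    rw [solutionLoop, dif_pos h, ih ha hb0 hba]
    set q := PySem.Int.floordiv e a with hqdef
    set r := PySem.Int.mod e a with hrdef
    have hq : 1 ≤ q := by
      rw [hqdef, PySem.Int.le_floordiv_iff_mul_le ha]; omega
    have hm1 : 0 ≤ r := by
      rw [hrdef, PySem.Int.mod_eq_emod_of_pos ha]; exact Int.emod_nonneg e (by omega)
    have hm2 : r < a := by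
      rw [hrdef, PySem.Int.mod_eq_emod_of_pos ha]; exact Int.emod_lt_of_pos e ha
    have heq : q * a + r = e := PySem.Int.floordiv_mul_add_mod e a
    have hqb : b ≤ q * b := by nlinarith
    have hc : 0 < a - b := by omega
    by_cases hcase : r + q * b < a
    · -- e' < a: recursion contributes 0 and (e-b)//(a-b) = q
      have hS : solution_alt a b (r + q * b) = 0 := by
        simp [solution_alt, hcase]
      have hdiv : PySem.Int.floordiv (e - b) (a - b) = q := by
        rw [PySem.Int.floordiv_eq_iff_of_pos hc]
        constructor <;> nlinarith
      rw [hS]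
      simp only [solution_alt, if_neg (show ¬ e < a by omega), hdiv]
      ring
    · -- e' ≥ a: (e-b)//(a-b) = q + (e'-b)//(a-b)
      rw [not_lt] at hcase
      set q2 := PySem.Int.floordiv (r + q * b - b) (a - b) with hq2def
      have hq2 : q2 * (a - b) ≤ r + q * b - b ∧ r + q * b - b < (q2 + 1) * (a - b) := by
        rw [hq2def, ← PySem.Int.floordiv_eq_iff_of_pos hc]
      have hdiv : PySem.Int.floordiv (e - b) (a - b) = q + q2 := by
        rw [PySem.Int.floordiv_eq_iff_of_pos hc]
        constructor <;> nlinarith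
      have hS : solution_alt a b (r + q * b) = q2 * b := by
        simp [solution_alt, hq2def, if_neg (by omega : ¬ r + q * b < a)]
      rw [hS]
      simp only [solution_alt, if_neg (show ¬ e < a by omega), hdiv]
      ring
  | case2 e total h =>
    intro ha hb0 hba
    have hne : e < a := by
      by_contra hc; exact h ⟨by omega, ha, hba⟩
    rw [solutionLoop, dif_neg h]
    simp [solution_alt, hne]

-- ===== VERDICT (by name: the statement is the Claim_ definition above) =====
theorem solution_spec : Claim_equal_solution := by
  intro a b n _ hpre
  unfold Spec_solution solution
  rcases hpre with hlt | ⟨ha, hb0, hba⟩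
  · rw [solutionLoop, dif_neg (by omega)]
    simp [solution_alt, hlt]
  · rw [solutionLoop_closed a b n 0 ha hb0 hba]; ring
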